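-- pv_equiv track=rewrite | github.com/couchbase-examples/agent-catalog-quickstart | notebooks/flight_search_agent_langraph/main.py | _clean_tool_input
-- ===== SOURCE A (Python) =====
-- def _clean_tool_input(tool_input: str) -> str:
--     """Clean and normalize tool input for consistent processing."""
--     if not isinstance(tool_input, str):
--         tool_input = str(tool_input)
--
--     # Remove ReAct format artifacts - handle all variations
--     artifacts_to_remove = [
--         '"\nObservation', '\nObservation', 'Observation',
--         '\nThought:', 'Thought:', '\nAction:', 'Action:',
--         '\nAction Input:', 'Action Input:', '\nFinal Answer:', 'Final Answer:'
--     ]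
--
--     clean_input = tool_input
--     for artifact in artifacts_to_remove:
--         if artifact in clean_input:
--             clean_input = clean_input.split(artifact)[0]
--
--     # Clean up quotes and whitespace
--     clean_input = clean_input.strip().strip("\"'").strip()
--     clean_input = " ".join(clean_input.split())
--
--     return clean_input
-- ===== SOURCE B (Python) =====
-- def _clean_tool_input(tool_input: str) -> str:
--     """Clean and normalize tool input for consistent processing."""
--     if not isinstance(tool_input, str):
--         tool_input = str(tool_input)
--
--     artifacts_to_remove = [
--         '"\nObservation', '\nObservation', 'Observation',
--         '\nThought:', 'Thought:', '\nAction:', 'Action:',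
--         '\nAction Input:', 'Action Input:', '\nFinal Answer:', 'Final Answer:'
--     ]
--
--     # earliest cut point over all artifacts, computed once; a single slice
--     positions = [p for p in (tool_input.find(a) for a in artifacts_to_remove) if p != -1]
--     clean_input = tool_input[:min(positions, default=len(tool_input))]
--
--     clean_input = clean_input.strip().strip("\"'").strip()
--     clean_input = " ".join(clean_input.split())
--     return clean_input
-- ===== Notes on version B (the rewrite author's own statement) =====
-- stated objective: alternative
-- what changed: B replaces the sequential truncate-at-each-artifact loop (repeated 'in' scan + split + slice per artifact) by computing each artifact's first index with str.find once, taking the minimum found position, and slicing the input a single time; the quote/whitespace normalization tail is unchanged.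
import Mathlib
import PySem

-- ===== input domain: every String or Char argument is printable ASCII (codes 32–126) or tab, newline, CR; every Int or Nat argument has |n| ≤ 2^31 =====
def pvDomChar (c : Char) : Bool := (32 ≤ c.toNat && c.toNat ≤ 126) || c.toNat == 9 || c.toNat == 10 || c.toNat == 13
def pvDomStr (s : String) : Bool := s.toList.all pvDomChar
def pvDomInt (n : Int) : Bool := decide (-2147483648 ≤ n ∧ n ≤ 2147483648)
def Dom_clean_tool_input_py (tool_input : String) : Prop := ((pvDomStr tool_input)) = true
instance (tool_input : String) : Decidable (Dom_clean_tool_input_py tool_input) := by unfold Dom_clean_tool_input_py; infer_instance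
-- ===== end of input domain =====

-- B computes every artifact's first index once and slices a single time instead of A's
-- repeated truncate-per-artifact loop (alternative decomposition, same observable result).

-- ===== PORT A =====
def pyArtifacts : List String :=
  ["\"\nObservation", "\nObservation", "Observation",
   "\nThought:", "Thought:", "\nAction:", "Action:",
   "\nAction Input:", "Action Input:", "\nFinal Answer:", "Final Answer:"]

-- one iteration of A's loop: if artifact in clean: clean = clean.split(artifact)[0]
-- (every artifact literal is nonempty, so split? is some and the split list nonempty; [0] is its head)
def cleanStepA (clean artifact : String) : String :=
  if PySem.Str.isIn artifact clean then ((PySem.Str.split? clean artifact).getD []).headD "" else clean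

def clean_tool_input_py (tool_input : String) : String :=
  let clean1 := pyArtifacts.foldl cleanStepA tool_input
  let clean2 := PySem.Str.strip (PySem.Str.stripChars (PySem.Str.strip clean1) "\"'")
  PySem.Str.join " " (PySem.Str.split₀ clean2)

-- ===== PORT B =====
def clean_tool_input_py_alt (tool_input : String) : String :=
  let positions := (pyArtifacts.map (fun a => PySem.Str.find tool_input a)).filter (fun p => decide (p ≠ -1))
  let clean1 := PySem.Str.slice tool_input none
      (some (PySem.List.minD positions (fun p => p) (PySem.Str.len tool_input)))
  let clean2 := PySem.Str.strip (PySem.Str.stripChars (PySem.Str.strip clean1) "\"'")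
  PySem.Str.join " " (PySem.Str.split₀ clean2)

-- ===== PRECONDITION & SPEC =====
def Spec_clean_tool_input_py (tool_input : String) (out : String) : Prop := out = clean_tool_input_py_alt tool_input
instance (tool_input : String) (out : String) : Decidable (Spec_clean_tool_input_py tool_input out) := by unfold Spec_clean_tool_input_py; infer_instance

-- ===== CLAIM (what is proved, stated in full; the proofs are below) =====
def Claim_equal_clean_tool_input_py : Prop := ∀ (tool_input : String), Dom_clean_tool_input_py tool_input → Spec_clean_tool_input_py tool_input (clean_tool_input_py tool_input)

-- ===== LEMMAS AND PROOFS =====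

-- Chars-level image of A's loop body
def pvStepC (c a : List Char) : List Char :=
  if PySem.Chars.isIn a c then ((PySem.Chars.split? c a).getD []).headD [] else c

-- the part of l before the first occurrence of sep
def pvBefore (sep : List Char) : List Char → List Char
  | [] => []
  | c :: rest => if sep.isPrefixOf (c :: rest) then [] else c :: pvBefore sep rest

-- cut position an artifact induces on s (find index, or len when absent)
def pvCut (s a : List Char) : Int :=
  if PySem.Chars.find s a = -1 then (s.length : Int) else PySem.Chars.find s a

-- "no proper suffix of a is prefix-comparable with b": an occurrence of b can never
-- start strictly inside an occurrence of a
def pvR (b a : List Char) : Prop :=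
  ∀ k : Nat, k < a.length → 0 < k → ¬(a.drop k <+: b ∨ b <+: a.drop k)

lemma pv_go_acc (sep : List Char) : ∀ (fuel : Nat) (l cur : List Char) (acc : List (List Char)),
    PySem.Chars.splitOn.go sep fuel l cur acc
      = acc.reverse ++ PySem.Chars.splitOn.go sep fuel l cur [] := by
  intro fuel
  induction fuel with
  | zero =>
    intro l cur acc
    rw [PySem.Chars.splitOn.go, PySem.Chars.splitOn.go]
    simp
  | succ f ih =>
    intro l cur acc
    cases l with
    | nil =>
      rw [PySem.Chars.splitOn.go, PySem.Chars.splitOn.go]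
      · simp
      all_goals omega
    | cons c rest =>
      rw [PySem.Chars.splitOn.go, PySem.Chars.splitOn.go]
      by_cases hp : sep.isPrefixOf (c :: rest)
      · simp only [hp, if_true]
        rw [ih _ _ (cur.reverse :: acc), ih _ _ [cur.reverse]]
        simp
      · simp only [hp, Bool.false_eq_true, if_false]
        exact ih _ _ _

lemma pv_go_head (sep : List Char) : ∀ (fuel : Nat) (l cur : List Char), l.length ≤ fuel →
    (PySem.Chars.splitOn.go sep fuel l cur []).headD [] = cur.reverse ++ pvBefore sep l := by
  intro fuel
  induction fuel with
  | zero =>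
    intro l cur hl
    have : l = [] := by
      cases l with
      | nil => rfl
      | cons c r => simp at hl
    subst this
    rw [PySem.Chars.splitOn.go]
    simp [pvBefore]
  | succ f ih =>
    intro l cur hl
    cases l with
    | nil =>
      rw [PySem.Chars.splitOn.go]
      · simp [pvBefore]
      all_goals omega
    | cons c rest =>
      rw [PySem.Chars.splitOn.go]
      by_cases hp : sep.isPrefixOf (c :: rest)
      · simp only [hp, if_true, pvBefore]
        rw [pv_go_acc]
        simp
      · simp only [hp, Bool.false_eq_true, if_false, pvBefore]
        rw [ih rest (c :: cur) (by simp at hl; omega)]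
        simp

lemma pv_splitOn_headD (s sep : List Char) :
    (PySem.Chars.splitOn s sep).headD [] = pvBefore sep s := by
  unfold PySem.Chars.splitOn
  exact pv_go_head sep (s.length + 1) s [] (by omega)

lemma pv_find_eq (s sub : List Char) (k : Nat) (h1 : sub <+: s.drop k)
    (h2 : ∀ i, i < k → ¬ sub <+: s.drop i) : PySem.Chars.find s sub = (k : Int) := by
  have hin : PySem.Chars.isIn sub s = true :=
    (PySem.Chars.exists_prefix_drop_iff_isIn sub s).mp ⟨k, h1⟩
  have hinf : sub <:+: s := (PySem.Chars.isIn_iff_infix sub s).mp hin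
  have h0 : 0 ≤ PySem.Chars.find s sub := (PySem.Chars.find_nonneg_iff s sub).mpr hinf
  obtain ⟨hp, hmin⟩ := PySem.Chars.find_spec h0
  have hk : (PySem.Chars.find s sub).toNat = k := by
    rcases lt_trichotomy (PySem.Chars.find s sub).toNat k with h | h | h
    · exact absurd hp (h2 _ h)
    · exact h
    · exact absurd h1 (hmin k h)
  omega

lemma pv_not_infix_cons (sep : List Char) (c : Char) (rest : List Char)
    (hp : ¬ sep <+: (c :: rest)) (hi : ¬ sep <:+: rest) : ¬ sep <:+: (c :: rest) := by
  intro hinf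
  obtain ⟨j, hj⟩ := (PySem.Chars.exists_prefix_drop_iff_isIn sep (c :: rest)).mpr
    ((PySem.Chars.isIn_iff_infix sep (c :: rest)).mpr hinf)
  cases j with
  | zero => exact hp (by simpa using hj)
  | succ i =>
    exact hi ((PySem.Chars.isIn_iff_infix sep rest).mp
      ((PySem.Chars.exists_prefix_drop_iff_isIn sep rest).mp ⟨i, by simpa using hj⟩))

lemma pv_before_of_find (sep s : List Char) (h : 0 ≤ PySem.Chars.find s sep) :
    pvBefore sep s = s.take (PySem.Chars.find s sep).toNat := by
  induction s with
  | nil => simp [pvBefore]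
  | cons c rest ih =>
    by_cases hp : sep.isPrefixOf (c :: rest)
    · have hf : PySem.Chars.find (c :: rest) sep = ((0 : Nat) : Int) := by
        apply pv_find_eq
        · simpa using List.isPrefixOf_iff_prefix.mp hp
        · intro i hi; omega
      simp [pvBefore, hp, hf]
    · by_cases hi : sep <:+: rest
      · have h0r : 0 ≤ PySem.Chars.find rest sep :=
          (PySem.Chars.find_nonneg_iff rest sep).mpr hi
        obtain ⟨hpr, hminr⟩ := PySem.Chars.find_spec h0r
        have hf : PySem.Chars.find (c :: rest) sep
            = (((PySem.Chars.find rest sep).toNat + 1 : Nat) : Int) := by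
          apply pv_find_eq
          · rw [List.drop_succ_cons]; exact hpr
          · intro i hilt
            cases i with
            | zero =>
              intro hpre
              exact hp (List.isPrefixOf_iff_prefix.mpr (by simpa using hpre))
            | succ i' =>
              rw [List.drop_succ_cons]
              exact hminr i' (by omega)
        rw [hf]
        simp only [pvBefore, hp, Bool.false_eq_true, if_false]
        rw [ih h0r, Int.toNat_natCast, List.take_succ_cons]
      · exfalso
        have hni : ¬ sep <:+: (c :: rest) :=
          pv_not_infix_cons sep c rest
            (fun hpre => hp (List.isPrefixOf_iff_prefix.mpr hpre)) hi
        have := (PySem.Chars.find_eq_neg_one_iff (c :: rest) sep).mpr hni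
        omega

lemma pv_cut_nonneg (s a : List Char) : 0 ≤ pvCut s a := by
  unfold pvCut
  split
  · exact_mod_cast Nat.zero_le _
  · have := PySem.Chars.neg_one_le_find s a
    omega

lemma pv_stepC_eq (s a : List Char) (ha : a ≠ []) :
    pvStepC s a = s.take (pvCut s a).toNat := by
  unfold pvStepC pvCut
  have hspl : PySem.Chars.split? s a = some (PySem.Chars.splitOn s a) := by
    unfold PySem.Chars.split?
    simp [ha]
  by_cases hf : PySem.Chars.find s a = -1
  · have hni : ¬ a <:+: s := (PySem.Chars.find_eq_neg_one_iff s a).mp hf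
    have : PySem.Chars.isIn a s = false := by
      rw [← Bool.not_eq_true, PySem.Chars.isIn_iff_infix]; exact hni
    simp [this, hf]
  · have h0 : 0 ≤ PySem.Chars.find s a := by
      have := PySem.Chars.neg_one_le_find s a; omega
    have : PySem.Chars.isIn a s = true := by
      rw [PySem.Chars.isIn_iff_infix]
      exact (PySem.Chars.find_nonneg_iff s a).mp h0
    simp only [this, if_true, hf, if_false, hspl, Option.getD_some]
    rw [pv_splitOn_headD]
    exact pv_before_of_find a s h0

lemma pv_prefix_drop_take (a s : List Char) (j k : Nat) (_hk : k ≤ a.length)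
    (h : a <+: s.drop j) : a.drop k <+: s.drop (j + k) := by
  have he : a = List.take a.length (s.drop j) := List.prefix_iff_eq_take.mp h
  have : a.drop k = List.take (a.length - k) (s.drop (j + k)) := by
    conv_lhs => rw [he]
    rw [List.drop_take, List.drop_drop]
  rw [this]
  exact List.take_prefix _ _

lemma pv_occ_of_occ_take (a s : List Char) (m i : Nat)
    (h : a <+: (s.take m).drop i) : a <+: s.drop i ∧ a.length ≤ m - i := by
  rw [List.drop_take] at h
  constructor
  · exact h.trans (List.take_prefix _ _)
  · have := h.length_le
    rw [List.length_take] at this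
    omega

lemma pv_occ_take_of_occ (a s : List Char) (m j : Nat) (h : a <+: s.drop j)
    (hlen : j + a.length ≤ m) : a <+: (s.take m).drop j := by
  rw [List.drop_take]
  have he : a = List.take a.length (s.drop j) := List.prefix_iff_eq_take.mp h
  rw [List.prefix_iff_eq_take, List.take_take]
  have hmin : min a.length (m - j) = a.length := by omega
  rw [hmin]
  exact he

lemma pv_main (s : List Char) : ∀ (arts : List (List Char)) (m : Int),
    (∀ a ∈ arts, a ≠ []) → List.Pairwise pvR arts → 0 ≤ m → m ≤ (s.length : Int) →
    (m = (s.length : Int) ∨ ∃ b, b ≠ [] ∧ (∀ a ∈ arts, pvR b a) ∧ b <+: s.drop m.toNat) →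
    arts.foldl pvStepC (s.take m.toNat)
      = s.take (arts.foldl (fun m' a => min m' (pvCut s a)) m).toNat := by
  intro arts
  induction arts with
  | nil => intro m _ _ _ _ _; rfl
  | cons a rest ih =>
    intro m hne hpw h0 hml hsrc
    have ha : a ≠ [] := hne a (by simp)
    have halen : 0 < a.length := List.length_pos_of_ne_nil ha
    obtain ⟨hpwa, hpwr⟩ := List.pairwise_cons.mp hpw
    have hner : ∀ a' ∈ rest, a' ≠ [] := fun a' h' => hne a' (by simp [h'])
    have hsrcr : (m = (s.length : Int) ∨
        ∃ b, b ≠ [] ∧ (∀ a' ∈ rest, pvR b a') ∧ b <+: s.drop m.toNat) := by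
      rcases hsrc with h | ⟨b, hb1, hb2, hb3⟩
      · exact Or.inl h
      · exact Or.inr ⟨b, hb1, fun a' h' => hb2 a' (by simp [h']), hb3⟩
    rw [List.foldl_cons, List.foldl_cons]
    by_cases hf : PySem.Chars.find s a = -1
    · -- a occurs nowhere in s, so nowhere in the prefix: the step is the identity
      have hnis : ¬ a <:+: s := (PySem.Chars.find_eq_neg_one_iff s a).mp hf
      have hnit : PySem.Chars.isIn a (s.take m.toNat) = false := by
        rw [← Bool.not_eq_true, PySem.Chars.isIn_iff_infix]
        exact fun hin => hnis (hin.trans (List.take_prefix _ _).isInfix)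
      have hstep : pvStepC (s.take m.toNat) a = s.take m.toNat := by
        unfold pvStepC; simp [hnit]
      have hc : pvCut s a = (s.length : Int) := by unfold pvCut; simp [hf]
      rw [hstep, hc, min_eq_left hml]
      exact ih m hner hpwr h0 hml hsrcr
    · have h0f : 0 ≤ PySem.Chars.find s a := by
        have := PySem.Chars.neg_one_le_find s a; omega
      obtain ⟨hocc, hmin⟩ := PySem.Chars.find_spec h0f
      have hjlen : (PySem.Chars.find s a).toNat + a.length ≤ s.length := by
        have h1 := hocc.length_le
        rw [List.length_drop] at h1
        have h2 := PySem.Chars.find_le_length s a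
        omega
      have hc : pvCut s a = PySem.Chars.find s a := by unfold pvCut; simp [hf]
      by_cases hcase : ((PySem.Chars.find s a).toNat : Int) + a.length ≤ m
      · -- the first occurrence lies inside the current prefix: the step cuts there
        have hft : PySem.Chars.find (s.take m.toNat) a
            = ((PySem.Chars.find s a).toNat : Int) := by
          apply pv_find_eq
          · exact pv_occ_take_of_occ a s m.toNat _ hocc (by omega)
          · intro i hilt hpre
            exact hmin i hilt (pv_occ_of_occ_take a s m.toNat i hpre).1
        have hstep : pvStepC (s.take m.toNat) a
            = s.take (PySem.Chars.find s a).toNat := by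
          rw [pv_stepC_eq _ a ha]
          have hct : pvCut (s.take m.toNat) a
              = ((PySem.Chars.find s a).toNat : Int) := by
            unfold pvCut
            rw [hft, if_neg (by omega : ¬ (((PySem.Chars.find s a).toNat : Int)) = -1)]
          rw [hct, Int.toNat_natCast, List.take_take]
          congr 1
          omega
        have hmlt : pvCut s a ≤ m := by rw [hc]; omega
        rw [hstep, min_eq_right hmlt, hc]
        exact ih (PySem.Chars.find s a) hner hpwr h0f (by omega)
          (Or.inr ⟨a, ha, hpwa, hocc⟩)
      · -- the first occurrence reaches past the prefix: the step is the identity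
        have hnit : PySem.Chars.isIn a (s.take m.toNat) = false := by
          rw [← Bool.not_eq_true, PySem.Chars.isIn_iff_infix]
          intro hin
          obtain ⟨i, hpre⟩ := (PySem.Chars.exists_prefix_drop_iff_isIn a (s.take m.toNat)).mpr
            ((PySem.Chars.isIn_iff_infix a (s.take m.toNat)).mpr hin)
          obtain ⟨hps, hlen'⟩ := pv_occ_of_occ_take a s m.toNat i hpre
          have hge : (PySem.Chars.find s a).toNat ≤ i := by
            by_contra hlt
            exact hmin i (by omega) hps
          omega
        have hstep : pvStepC (s.take m.toNat) a = s.take m.toNat := by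
          unfold pvStepC; simp [hnit]
        rw [hstep, hc]
        by_cases hm2 : m ≤ PySem.Chars.find s a
        · rw [min_eq_left hm2]
          exact ih m hner hpwr h0 hml hsrcr
        · exfalso
          rcases hsrc with heq | ⟨b, hb1, hb2, hb3⟩
          · omega
          · have hRba : pvR b a := hb2 a (by simp)
            have hk1 : 0 < m.toNat - (PySem.Chars.find s a).toNat := by omega
            have hk2 : m.toNat - (PySem.Chars.find s a).toNat < a.length := by omega
            have hdp := pv_prefix_drop_take a s (PySem.Chars.find s a).toNat
              (m.toNat - (PySem.Chars.find s a).toNat) (by omega) hocc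
            rw [show (PySem.Chars.find s a).toNat
                + (m.toNat - (PySem.Chars.find s a).toNat) = m.toNat by omega] at hdp
            rcases List.prefix_or_prefix_of_prefix hdp hb3 with h' | h'
            · exact hRba _ hk2 hk1 (Or.inl h')
            · exact hRba _ hk2 hk1 (Or.inr h')

lemma pv_foldmin (s : List Char) : ∀ (arts : List (List Char)) (m : Int), m ≤ (s.length : Int) →
    arts.foldl (fun m' a => min m' (pvCut s a)) m
      = List.foldl min m ((arts.map (PySem.Chars.find s)).filter (fun p => decide (p ≠ -1))) := by
  intro arts
  induction arts with
  | nil => intro m _; rfl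
  | cons a rest ih =>
    intro m hm
    rw [List.foldl_cons, List.map_cons]
    by_cases hf : PySem.Chars.find s a = -1
    · have hc : pvCut s a = (s.length : Int) := by unfold pvCut; simp [hf]
      rw [hc, min_eq_left hm, List.filter_cons]
      have hd : (decide (PySem.Chars.find s a ≠ -1)) = false := by simp [hf]
      rw [hd]
      simp only [Bool.false_eq_true, if_false]
      exact ih _ hm
    · have hc : pvCut s a = PySem.Chars.find s a := by unfold pvCut; simp [hf]
      rw [hc, List.filter_cons]
      simp only [ne_eq, hf, not_false_eq_true, decide_true, if_true, List.foldl_cons]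
      exact ih _ (le_trans (min_le_left _ _) hm)

lemma pv_minD_foldl : ∀ (xs : List Int) (d : Int), (∀ x ∈ xs, x ≤ d) →
    PySem.List.minD xs (fun p => p) d = List.foldl min d xs := by
  intro xs
  cases xs with
  | nil => intro d _; simp [PySem.List.minD_nil]
  | cons x t =>
    intro d hd
    rw [PySem.List.minD_id_cons, List.foldl_cons, min_eq_right (hd x (by simp))]

lemma pv_fold_nonneg (s : List Char) : ∀ (arts : List (List Char)) (m : Int), 0 ≤ m →
    0 ≤ arts.foldl (fun m' a => min m' (pvCut s a)) m := by
  intro arts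
  induction arts with
  | nil => intro m hm; simpa using hm
  | cons a rest ih =>
    intro m hm
    rw [List.foldl_cons]
    exact ih _ (le_min hm (pv_cut_nonneg s a))

lemma pv_step_bridge (c a : String) : (cleanStepA c a).toList = pvStepC c.toList a.toList := by
  unfold cleanStepA pvStepC
  rw [PySem.Str.isIn_eq]
  by_cases h : PySem.Chars.isIn a.toList c.toList = true
  · simp only [h, if_true]
    have := PySem.Str.split?_map c a
    cases hs : PySem.Str.split? c a with
    | none => rw [hs] at this; simp at this; rw [← this]; simp
    | some parts =>
      rw [hs] at this
      simp only [Option.map_some] at this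
      rw [← this]
      simp only [Option.getD_some]
      cases parts with
      | nil => simp
      | cons p ps => simp
  · rw [Bool.not_eq_true] at h
    simp [h]

lemma pv_fold_bridge : ∀ (arts : List String) (c : String),
    (arts.foldl cleanStepA c).toList = (arts.map String.toList).foldl pvStepC c.toList := by
  intro arts
  induction arts with
  | nil => intro c; rfl
  | cons a rest ih =>
    intro c
    rw [List.foldl_cons, List.map_cons, List.foldl_cons, ih, pv_step_bridge]

lemma pv_artifacts_ne : ∀ a ∈ pyArtifacts.map String.toList, a ≠ [] := by decide

lemma pv_artifacts_pairwise : List.Pairwise pvR (pyArtifacts.map String.toList) := by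
  show List.Pairwise
    (fun b a => ∀ k : Nat, k < a.length → 0 < k → ¬(a.drop k <+: b ∨ b <+: a.drop k))
    (pyArtifacts.map String.toList)
  decide

lemma pv_clean1_eq (t : String) :
    pyArtifacts.foldl cleanStepA t
      = PySem.Str.slice t none
          (some (PySem.List.minD ((pyArtifacts.map (fun a => PySem.Str.find t a)).filter (fun p => decide (p ≠ -1)))
            (fun p => p) (PySem.Str.len t))) := by
  apply String.toList_inj.mp
  rw [pv_fold_bridge, PySem.Str.toList_slice]
  have hpos : (pyArtifacts.map (fun a => PySem.Str.find t a)).filter (fun p => decide (p ≠ -1))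
      = ((pyArtifacts.map String.toList).map (PySem.Chars.find t.toList)).filter
          (fun p => decide (p ≠ -1)) := by
    rw [List.map_map]
    rfl
  have hle : ∀ x ∈ ((pyArtifacts.map String.toList).map (PySem.Chars.find t.toList)).filter
      (fun p => decide (p ≠ -1)), x ≤ (t.toList.length : Int) := by
    intro x hx
    obtain ⟨hx1, _⟩ := List.mem_filter.mp hx
    obtain ⟨a, _, rfl⟩ := List.mem_map.mp hx1
    exact PySem.Chars.find_le_length t.toList a
  have hminD : PySem.List.minD (((pyArtifacts.map String.toList).map (PySem.Chars.find t.toList)).filter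
        (fun p => decide (p ≠ -1))) (fun p => p) ((t.toList.length : Int))
      = (pyArtifacts.map String.toList).foldl
          (fun m' a => min m' (pvCut t.toList a)) ((t.toList.length : Int)) := by
    rw [pv_minD_foldl _ _ hle, pv_foldmin t.toList _ _ le_rfl]
  have hmain := pv_main t.toList (pyArtifacts.map String.toList) ((t.toList.length : Int))
    pv_artifacts_ne pv_artifacts_pairwise (by positivity) le_rfl (Or.inl rfl)
  rw [Int.toNat_natCast, List.take_length] at hmain
  rw [hmain, hpos, PySem.Str.len_eq, hminD]
  have hnn : 0 ≤ (pyArtifacts.map String.toList).foldl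
      (fun m' a => min m' (pvCut t.toList a)) ((t.toList.length : Int)) :=
    pv_fold_nonneg t.toList _ _ (by positivity)
  show _ = PySem.List.slice _ _ _
  rw [PySem.List.slice_to _ hnn]

-- ===== VERDICT (by name: the statement is the Claim_ definition above) =====
theorem clean_tool_input_py_spec : Claim_equal_clean_tool_input_py := by
  intro t _
  unfold Spec_clean_tool_input_py clean_tool_input_py clean_tool_input_py_alt
  rw [pv_clean1_eq t]
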